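-- pv_equiv track=rewrite | github.com/pabloschwarzenberg/grader | tema10_ej3/tema10_ej3_52c42ea8fe39e2afeb60551cb18f3e82.py | buscar_vertical
-- ===== SOURCE A (Python) =====
-- def buscar_vertical(sopa, palabra):
--     n_filas = len(sopa)
--     n_columnas = len(sopa[0])
--     palabra = palabra.upper()
--     for columna in range(n_columnas):
--         for fila in range(n_filas - len(palabra) + 1):
--             if [sopa[fila + i][columna] for i in range(len(palabra))] == list(palabra):
--                 return [fila, columna], "abajo"
--     return None
-- ===== SOURCE B (Python) =====
-- def buscar_vertical(sopa, palabra):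
--     # Build each column as one string (cells that are not single characters can
--     # never match a letter, so they become a NUL placeholder) and let str.find
--     # locate the first occurrence of the word, column by column.
--     palabra = palabra.upper()
--     if len(palabra) > len(sopa):
--         return None  # the word cannot fit vertically
--     for columna in range(len(sopa[0])):
--         col = ''.join(r[columna] if len(r[columna]) == 1 else '\x00' for r in sopa)
--         fila = col.find(palabra)
--         if fila != -1:
--             return [fila, columna], "abajo"
--     return None
-- ===== Notes on version B (the rewrite author's own statement) =====
-- stated objective: alternative
-- what changed: Instead of re-extracting and comparing an m-cell slice at every (row, column) offset, B builds each column once as a single string (non-single-character cells become a NUL placeholder that can never match) and delegates the per-column search to str.find, a single substring search per column, after an early exit when the word is taller than the grid.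
-- outside the precondition, e.g. on buscar_vertical([['A'], []], 'a'): A returns ([0, 0], 'abajo'), B raises IndexError
import Mathlib
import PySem

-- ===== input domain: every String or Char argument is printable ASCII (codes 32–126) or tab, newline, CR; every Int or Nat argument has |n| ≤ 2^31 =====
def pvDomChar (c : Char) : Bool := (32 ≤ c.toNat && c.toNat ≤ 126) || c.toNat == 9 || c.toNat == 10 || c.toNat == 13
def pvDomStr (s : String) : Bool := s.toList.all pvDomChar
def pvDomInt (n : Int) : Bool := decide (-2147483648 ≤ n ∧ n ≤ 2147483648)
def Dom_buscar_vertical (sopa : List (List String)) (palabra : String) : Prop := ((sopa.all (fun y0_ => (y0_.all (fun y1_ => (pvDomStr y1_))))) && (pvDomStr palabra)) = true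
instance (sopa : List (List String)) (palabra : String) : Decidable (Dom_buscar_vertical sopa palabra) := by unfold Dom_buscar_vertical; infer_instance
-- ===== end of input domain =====

-- B builds each column once and runs one str.find substring search per column (with an early exit when the word is taller than the grid) instead of A's per-offset slice comparison.

-- ===== PORT A =====
-- inner scan 'for fila in range(...): if [sopa[fila+i][columna] for i in range(len(palabra))] == list(palabra): return ...'
def pvA_rows (sopa : List (List String)) (pal : String) (patS : List String) (columna : Int) :
    List Int → Option (List Int × String)
  | [] => none
  | fila :: rest =>
    if ((PySem.List.pyRange 0 (PySem.Str.len pal) 1).map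
          (fun i => PySem.List.pyGetD (PySem.List.pyGetD sopa (fila + i) []) columna "")) = patS
    then some ([fila, columna], "abajo")
    else pvA_rows sopa pal patS columna rest

-- outer scan 'for columna in range(n_columnas): ...'
def pvA_cols (sopa : List (List String)) (pal : String) (patS : List String) (n_filas : Int) :
    List Int → Option (List Int × String)
  | [] => none
  | columna :: rest =>
    match pvA_rows sopa pal patS columna
        (PySem.List.pyRange 0 (n_filas - PySem.Str.len pal + 1) 1) with
    | some r => some r
    | none => pvA_cols sopa pal patS n_filas rest

def buscar_vertical (sopa : List (List String)) (palabra : String) : Option (List Int × String) :=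
  let n_filas := PySem.List.len sopa
  let n_columnas := PySem.List.len (PySem.List.pyGetD sopa 0 [])
  let pal := PySem.Str.upper palabra
  let patS := pal.toList.map (fun ch => String.ofList [ch])   -- list(palabra)
  pvA_cols sopa pal patS n_filas (PySem.List.pyRange 0 n_columnas 1)

-- ===== PORT B =====
-- ''.join(r[columna] if len(r[columna]) == 1 else '\x00' for r in sopa), as a List Char
def pvB_col (sopa : List (List String)) (columna : Int) : List Char :=
  sopa.map (fun r =>
    let cell := PySem.List.pyGetD r columna ""
    if PySem.Str.len cell = 1 then cell.toList.headD (Char.ofNat 0) else Char.ofNat 0)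

-- 'for columna in range(len(sopa[0])): ... col.find(palabra) ...'
def pvB_cols (sopa : List (List String)) (pal : List Char) :
    List Int → Option (List Int × String)
  | [] => none
  | columna :: rest =>
    let fila := PySem.Chars.find (pvB_col sopa columna) pal
    if fila ≠ -1 then some ([fila, columna], "abajo")
    else pvB_cols sopa pal rest

def buscar_vertical_alt (sopa : List (List String)) (palabra : String) : Option (List Int × String) :=
  let pal := PySem.Str.upper palabra
  if PySem.Str.len pal > PySem.List.len sopa then none   -- the word cannot fit vertically
  else
    pvB_cols sopa pal.toList
      (PySem.List.pyRange 0 (PySem.List.len (PySem.List.pyGetD sopa 0 [])) 1)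

-- ===== PRECONDITION & SPEC =====
-- Pre_ excludes the empty grid (sopa[0] raises IndexError in both programs) and ragged grids in which,
-- with the word short enough to fit vertically, some row is shorter than the first row: there a cell
-- access can raise IndexError (in A, or in B while it builds a column A never fully reads).
def Pre_buscar_vertical (sopa : List (List String)) (palabra : String) : Prop :=
  sopa ≠ [] ∧ (sopa.length < palabra.toList.length ∨ ∀ r ∈ sopa, (sopa.headD []).length ≤ r.length)
instance (sopa : List (List String)) (palabra : String) : Decidable (Pre_buscar_vertical sopa palabra) := by
  unfold Pre_buscar_vertical; infer_instance

def pvWitness_buscar_vertical : List (List String) × String := ([["C", "A"], ["A", "B"]], "ab")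

def Spec_buscar_vertical (sopa : List (List String)) (palabra : String) (out : Option (List Int × String)) : Prop := out = buscar_vertical_alt sopa palabra
instance (sopa : List (List String)) (palabra : String) (out : Option (List Int × String)) : Decidable (Spec_buscar_vertical sopa palabra out) := by unfold Spec_buscar_vertical; infer_instance

-- ===== CLAIM (what is proved, stated in full; the proofs are below) =====
def Claim_equal_buscar_vertical : Prop := ∀ (sopa : List (List String)) (palabra : String), Dom_buscar_vertical sopa palabra → Pre_buscar_vertical sopa palabra → Spec_buscar_vertical sopa palabra (buscar_vertical sopa palabra)

-- ===== LEMMAS AND PROOFS =====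

theorem pv_upper_ne_nul (s : String) (h : pvDomStr s = true) :
    ∀ ch ∈ (PySem.Str.upper s).toList, ch ≠ Char.ofNat 0 := by
  intro ch hch
  rw [PySem.Str.toList_upper] at hch
  obtain ⟨c, hc, rfl⟩ := List.mem_map.mp hch
  have hd : pvDomChar c = true := by
    unfold pvDomStr at h
    exact List.all_eq_true.mp h c hc
  unfold pvDomChar at hd
  have hc9 : 9 ≤ c.toNat := by
    simp only [Bool.or_eq_true, Bool.and_eq_true, decide_eq_true_eq, beq_iff_eq] at hd
    omega
  unfold PySem.Chars.upperChar PySem.Chars.islower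
  intro heq
  have h0 : (Char.ofNat 0).toNat = 0 := rfl
  split_ifs at heq with hlow
  · simp only [Bool.and_eq_true, decide_eq_true_eq] at hlow
    have h1' : 97 ≤ c.toNat := Nat.succ_le_of_lt hlow.1
    have h2' : c.toNat ≤ 122 := hlow.2
    have := congrArg Char.toNat heq
    rw [Char.toNat_ofNat, h0] at this
    have hv : (c.toNat - 32).isValidChar := Or.inl (by omega)
    rw [if_pos hv] at this
    omega
  · have := congrArg Char.toNat heq
    rw [h0] at this
    omega

theorem pv_cell_iff (cell : String) (ch : Char) (hch : ch ≠ Char.ofNat 0) :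
    cell = String.ofList [ch] ↔
      (if PySem.Str.len cell = 1 then cell.toList.headD (Char.ofNat 0) else Char.ofNat 0) = ch := by
  constructor
  · rintro rfl
    simp [PySem.Str.len_eq, String.toList_ofList]
  · intro hif
    by_cases hl : PySem.Str.len cell = 1
    · rw [if_pos hl] at hif
      rw [PySem.Str.len_eq] at hl
      match hcl : cell.toList with
      | [] => rw [hcl] at hl; simp at hl
      | a :: b :: t => rw [hcl] at hl; simp at hl; omega
      | [a] =>
        rw [hcl] at hif
        simp at hif
        subst hif
        rw [← hcl]
        exact (String.ofList_toList (s := cell)).symm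
    · rw [if_neg hl] at hif
      exact absurd hif.symm hch

theorem pv_check_iff (sopa : List (List String)) (p : List Char) (c fila : Nat)
    (hp : ∀ ch ∈ p, ch ≠ Char.ofNat 0)
    (hfm : fila + p.length ≤ sopa.length) :
    (((PySem.List.pyRange 0 (p.length : Int) 1).map
        (fun i => PySem.List.pyGetD (PySem.List.pyGetD sopa ((fila : Int) + i) []) (c : Int) ""))
      = p.map (fun ch => String.ofList [ch]))
    ↔ p <+: (pvB_col sopa (c : Int)).drop fila := by
  have hcollen : (pvB_col sopa (c : Int)).length = sopa.length := by simp [pvB_col]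
  rw [PySem.List.pyRange_zero_natCast, List.map_map, List.prefix_iff_eq_take]
  have hlen2 : (((pvB_col sopa (c : Int)).drop fila).take p.length).length = p.length := by
    simp [hcollen]; omega
  have key : ∀ (i : Nat) (hi : i < p.length),
      ((PySem.List.pyGetD (PySem.List.pyGetD sopa ((fila : Int) + ((i : Nat) : Int)) []) (c : Int) ""
          = String.ofList [p[i]]) ↔
        (pvB_col sopa (c : Int))[fila + i]'(by rw [hcollen]; omega) = p[i]) := by
    intro i hi
    have hcast : ((fila : Int) + ((i : Nat) : Int)) = (((fila + i : Nat)) : Int) := by push_cast; ring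
    rw [hcast, PySem.List.pyGetD_natCast sopa (fila + i) []]
    rw [show sopa.getD (fila + i) [] = sopa[fila + i]'(by omega) from List.getD_eq_getElem _ _ (by omega)]
    have hentry : (pvB_col sopa (c : Int))[fila + i]'(by rw [hcollen]; omega) =
        (if PySem.Str.len (PySem.List.pyGetD (sopa[fila + i]'(by omega)) (c : Int) "") = 1
         then (PySem.List.pyGetD (sopa[fila + i]'(by omega)) (c : Int) "").toList.headD (Char.ofNat 0)
         else Char.ofNat 0) := by
      simp [pvB_col]
    rw [hentry]
    exact pv_cell_iff _ _ (hp _ (List.getElem_mem hi))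
  constructor
  · intro h
    apply List.ext_getElem (by omega)
    intro i h1 h2
    have hi : i < p.length := h1
    have hpt := congrArg (fun l => l[i]?) h
    simp only [List.getElem?_map, List.getElem?_range hi, Option.map_some,
      List.getElem?_eq_getElem hi] at hpt
    have := (key i hi).mp (by simpa using hpt)
    rw [List.getElem_take, List.getElem_drop]
    exact this.symm
  · intro h
    apply List.ext_getElem (by simp)
    intro i h1 h2
    have hi : i < p.length := by simpa using h1
    simp only [List.getElem_map, List.getElem_range]
    apply (key i hi).mpr
    have hpt := congrArg (fun l => l[i]?) h
    simp only [List.getElem?_eq_getElem hi] at hpt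
    rw [List.getElem?_take] at hpt
    rw [if_pos hi] at hpt
    rw [List.getElem?_drop,
      List.getElem?_eq_getElem (by rw [hcollen]; omega : fila + i < (pvB_col sopa (c : Int)).length)] at hpt
    simpa using hpt.symm

theorem pv_rows_eq_find? (sopa : List (List String)) (pal : String) (patS : List String)
    (columna : Int) (l : List Int) :
    pvA_rows sopa pal patS columna l =
      (l.find? (fun fila =>
        decide (((PySem.List.pyRange 0 (PySem.Str.len pal) 1).map
          (fun i => PySem.List.pyGetD (PySem.List.pyGetD sopa (fila + i) []) columna "")) = patS))).map
        (fun fila => ([fila, columna], "abajo")) := by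
  induction l with
  | nil => rfl
  | cons fila rest ih =>
    simp only [pvA_rows]
    split_ifs with h
    · have hfind := List.find?_cons_of_pos (l := rest) (a := fila)
        (p := fun fila => decide (((PySem.List.pyRange 0 (PySem.Str.len pal) 1).map
          (fun i => PySem.List.pyGetD (PySem.List.pyGetD sopa (fila + i) []) columna "")) = patS))
        (decide_eq_true h)
      rw [hfind]; rfl
    · have hfind := List.find?_cons_of_neg (l := rest) (a := fila)
        (p := fun fila => decide (((PySem.List.pyRange 0 (PySem.Str.len pal) 1).map
          (fun i => PySem.List.pyGetD (PySem.List.pyGetD sopa (fila + i) []) columna "")) = patS))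
        (by simpa using h)
      rw [hfind]; exact ih

-- per-column equality: A's row scan returns what find computes

theorem pv_col_eq (sopa : List (List String)) (pal : String) (c : Nat)
    (hp : ∀ ch ∈ pal.toList, ch ≠ Char.ofNat 0) :
    pvA_rows sopa pal (pal.toList.map (fun ch => String.ofList [ch])) (c : Int)
        (PySem.List.pyRange 0 ((sopa.length : Int) - PySem.Str.len pal + 1) 1) =
      (if PySem.Chars.find (pvB_col sopa (c : Int)) pal.toList ≠ -1
       then some ([PySem.Chars.find (pvB_col sopa (c : Int)) pal.toList, (c : Int)], "abajo")
       else none) := by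
  have hcollen : (pvB_col sopa (c : Int)).length = sopa.length := by simp [pvB_col]
  set p := pal.toList with hpdef
  set col := pvB_col sopa (c : Int) with hcol
  rw [pv_rows_eq_find?]
  by_cases hF : PySem.Chars.find col p = -1
  · rw [if_neg (by simpa using hF)]
    have hnone : (PySem.List.pyRange 0 ((sopa.length : Int) - PySem.Str.len pal + 1) 1).find?
        (fun fila => decide (((PySem.List.pyRange 0 (PySem.Str.len pal) 1).map
          (fun i => PySem.List.pyGetD (PySem.List.pyGetD sopa (fila + i) []) (c : Int) "")) =
            p.map (fun ch => String.ofList [ch]))) = none := by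
      rw [List.find?_eq_none]
      intro fila hmem
      obtain ⟨h0, h1⟩ := PySem.List.mem_pyRange_one.mp hmem
      rw [PySem.Str.len_eq] at h1
      obtain ⟨fn, rfl⟩ : ∃ n : Nat, fila = (n : Int) := ⟨fila.toNat, (Int.toNat_of_nonneg h0).symm⟩
      simp only [decide_eq_true_eq]
      intro hchk
      have hfm : fn + p.length ≤ sopa.length := by
        have : (fn : Int) < (sopa.length : Int) - (p.length : Int) + 1 := by
          simpa [hpdef] using h1
        omega
      have hpre := (pv_check_iff sopa p c fn hp hfm).mp (by
        simpa [PySem.Str.len_eq, hpdef] using hchk)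
      have hinf : p <:+: col := hpre.isInfix.trans (List.drop_suffix fn col).isInfix
      exact ((PySem.Chars.find_eq_neg_one_iff col p).mp hF) hinf
    rw [hnone]; rfl
  · rw [if_pos (by simpa using hF)]
    have hF0 : 0 ≤ PySem.Chars.find col p := by
      have := PySem.Chars.neg_one_le_find col p; omega
    obtain ⟨hpre, hmin⟩ := PySem.Chars.find_spec hF0
    have hFle : PySem.Chars.find col p ≤ (col.length : Int) := PySem.Chars.find_le_length col p
    set Fn := (PySem.Chars.find col p).toNat with hFn
    have hFeq : PySem.Chars.find col p = (Fn : Int) := (Int.toNat_of_nonneg hF0).symm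
    have hlenle : p.length ≤ col.length - Fn := by
      have := hpre.length_le
      simpa using this
    have hFnle : Fn ≤ col.length := by omega
    have hfm : Fn + p.length ≤ sopa.length := by
      rw [← hcollen]; omega
    have hsplit : PySem.List.pyRange 0 ((sopa.length : Int) - PySem.Str.len pal + 1) 1 =
        PySem.List.pyRange 0 (Fn : Int) 1 ++
        PySem.List.pyRange (Fn : Int) ((sopa.length : Int) - PySem.Str.len pal + 1) 1 := by
      apply PySem.List.pyRange_one_append 0 (Fn : Int) _ (by omega)
      rw [PySem.Str.len_eq]
      have : (Fn : Int) ≤ (sopa.length : Int) - (p.length : Int) := by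
        omega
      simpa [hpdef] using (by omega : (Fn : Int) ≤ (sopa.length : Int) - (p.length : Int) + 1)
    rw [hsplit, List.find?_append]
    have h1 : (PySem.List.pyRange 0 (Fn : Int) 1).find?
        (fun fila => decide (((PySem.List.pyRange 0 (PySem.Str.len pal) 1).map
          (fun i => PySem.List.pyGetD (PySem.List.pyGetD sopa (fila + i) []) (c : Int) "")) =
            p.map (fun ch => String.ofList [ch]))) = none := by
      rw [List.find?_eq_none]
      intro fila hmem
      obtain ⟨h0, h1⟩ := PySem.List.mem_pyRange_one.mp hmem
      obtain ⟨fn, rfl⟩ : ∃ n : Nat, fila = (n : Int) := ⟨fila.toNat, (Int.toNat_of_nonneg h0).symm⟩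
      simp only [decide_eq_true_eq]
      intro hchk
      have hfn : fn < Fn := by exact_mod_cast h1
      have hpre' := (pv_check_iff sopa p c fn hp (by omega)).mp (by
        simpa [PySem.Str.len_eq, hpdef] using hchk)
      exact hmin fn hfn hpre'
    have hcons : PySem.List.pyRange (Fn : Int) ((sopa.length : Int) - PySem.Str.len pal + 1) 1 =
        (Fn : Int) :: PySem.List.pyRange ((Fn : Int) + 1) ((sopa.length : Int) - PySem.Str.len pal + 1) 1 := by
      apply PySem.List.pyRange_one_cons
      rw [PySem.Str.len_eq]
      have : (Fn : Int) < (sopa.length : Int) - (p.length : Int) + 1 := by omega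
      simpa [hpdef] using this
    rw [hcons]
    have h2 := List.find?_cons_of_pos
      (l := PySem.List.pyRange ((Fn : Int) + 1) ((sopa.length : Int) - PySem.Str.len pal + 1) 1)
      (a := (Fn : Int))
      (p := fun fila => decide (((PySem.List.pyRange 0 (PySem.Str.len pal) 1).map
          (fun i => PySem.List.pyGetD (PySem.List.pyGetD sopa (fila + i) []) (c : Int) "")) =
            p.map (fun ch => String.ofList [ch])))
      (by
        apply decide_eq_true
        have h := (pv_check_iff sopa p c Fn hp hfm).mpr hpre
        simpa [PySem.Str.len_eq, hpdef] using h)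
    rw [h1, h2]
    simp [hFeq]

theorem pv_cols_eq (sopa : List (List String)) (pal : String)
    (hp : ∀ ch ∈ pal.toList, ch ≠ Char.ofNat 0) (l : List Int)
    (hl : ∀ c ∈ l, 0 ≤ c) :
    pvA_cols sopa pal (pal.toList.map (fun ch => String.ofList [ch])) (PySem.List.len sopa) l =
      pvB_cols sopa pal.toList l := by
  induction l with
  | nil => rfl
  | cons c rest ih =>
    have hc0 : 0 ≤ c := hl c (by simp)
    have hrest : ∀ c ∈ rest, 0 ≤ c := fun x hx => hl x (by simp [hx])
    obtain ⟨cn, rfl⟩ : ∃ n : Nat, c = (n : Int) := ⟨c.toNat, (Int.toNat_of_nonneg hc0).symm⟩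
    simp only [pvA_cols, pvB_cols, PySem.List.len_eq]
    rw [pv_col_eq sopa pal cn hp]
    split_ifs with h
    · simp
    · simpa using ih hrest

-- ===== VERDICT (by name: the statement is the Claim_ definition above) =====

-- when the word is taller than the grid, A's inner row range is empty and its scan returns none
theorem pv_cols_none (sopa : List (List String)) (pal : String) (patS : List String)
    (hm : sopa.length < pal.toList.length) (l : List Int) :
    pvA_cols sopa pal patS (PySem.List.len sopa) l = none := by
  induction l with
  | nil => rfl
  | cons c rest ih =>
    have hempty : PySem.List.pyRange 0 ((PySem.List.len sopa) - PySem.Str.len pal + 1) 1 = [] := by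
      rw [PySem.List.len_eq, PySem.Str.len_eq, PySem.List.pyRange_one]
      have : ((sopa.length : Int) - (pal.toList.length : Int) + 1 - 0).toNat = 0 := by omega
      rw [this]; rfl
    simp only [pvA_cols, hempty]
    exact ih

-- ===== VERDICT (by name: the statement is the Claim_ definition above) =====
theorem buscar_vertical_spec : Claim_equal_buscar_vertical := by
  intro sopa palabra hDom hPre
  unfold Spec_buscar_vertical buscar_vertical buscar_vertical_alt
  have hpal : pvDomStr palabra = true := by
    unfold Dom_buscar_vertical at hDom; simp at hDom; exact hDom.2
  by_cases hm : PySem.Str.len (PySem.Str.upper palabra) > PySem.List.len sopa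
  · rw [if_pos hm]
    apply pv_cols_none
    rw [PySem.Str.len_eq, PySem.List.len_eq] at hm
    exact_mod_cast hm
  · rw [if_neg hm]
    exact pv_cols_eq sopa (PySem.Str.upper palabra)
      (pv_upper_ne_nul palabra hpal) _
      (fun c hc => (PySem.List.mem_pyRange_one.mp hc).1)
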